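-- pv_equiv track=rewrite | github.com/zapster/ha-ir-remote-devices | custom_components/ir_remote_devices/protocols.py | _reverse_pioneer_command_byte
-- ===== SOURCE A (Python) =====
-- def _reverse_pioneer_command_byte(command: int) -> int:
--     """Reverse the low and high nibbles as ESPHome does for Pioneer codes."""
--     reversed_command = 0
--
--     for bit in range(4):
--         if (command >> bit) & 1:
--             reversed_command |= 1 << (7 - bit)
--
--     for bit in range(4):
--         if (command >> (bit + 4)) & 1:
--             reversed_command |= 1 << (3 - bit)
--
--     return reversed_command
-- ===== SOURCE B (Python) =====
-- def _reverse_pioneer_command_byte(command: int) -> int: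
--     """Reverse the low and high nibbles as ESPHome does for Pioneer codes."""
--     return int('{:08b}'.format(command & 0xFF)[::-1], 2)
-- ===== Notes on version B (the rewrite author's own statement) =====
-- stated objective: idiomatic
-- what changed: Replaces the two 4-bit shift/or loops with masking to one byte, formatting as an 8-char binary string, reversing it and parsing it back in base 2.
import Mathlib
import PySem

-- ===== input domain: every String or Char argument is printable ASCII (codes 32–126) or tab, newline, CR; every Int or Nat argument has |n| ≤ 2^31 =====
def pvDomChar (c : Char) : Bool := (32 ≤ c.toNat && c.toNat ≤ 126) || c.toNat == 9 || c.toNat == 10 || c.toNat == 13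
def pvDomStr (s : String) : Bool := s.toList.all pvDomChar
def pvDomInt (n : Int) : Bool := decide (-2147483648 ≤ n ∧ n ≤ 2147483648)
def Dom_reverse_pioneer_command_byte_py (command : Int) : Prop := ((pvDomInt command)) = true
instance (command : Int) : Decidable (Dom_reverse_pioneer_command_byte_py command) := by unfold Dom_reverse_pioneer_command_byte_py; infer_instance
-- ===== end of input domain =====

-- B replaces A's two per-bit shift/or loops by masking to one byte, formatting it as an
-- 8-character binary string, reversing the string and parsing it back in base 2 (idiomatic; same cost).

-- ===== PORT A =====
def reverse_pioneer_command_byte_py (command : Int) : Int :=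
  -- reversed_command = 0; two 'for bit in range(4)' loops setting bits 7-bit and 3-bit
  let r1 := (List.range 4).foldl (fun acc (bit : Nat) =>
    if PySem.Int.band (command >>> bit) 1 ≠ 0 then PySem.Int.bor acc ((1 : Int) <<< (7 - bit)) else acc) 0
  (List.range 4).foldl (fun acc (bit : Nat) =>
    if PySem.Int.band (command >>> (bit + 4)) 1 ≠ 0 then PySem.Int.bor acc ((1 : Int) <<< (3 - bit)) else acc) r1

-- ===== PORT B =====
def reverse_pioneer_command_byte_py_alt (command : Int) : Int :=
  let n := PySem.Int.band command 255                   -- command & 0xFF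
  let s := PySem.Int.toBinChars n                       -- binary digits of n (n ≥ 0 here)
  let padded := List.replicate (8 - s.length) '0' ++ s  -- '{:08b}'.format(n): zero-pad to width 8
  (PySem.Int.ofCharsBase? padded.reverse 2).getD 0      -- int(reversed_string, 2); never none on these digit strings

-- ===== PRECONDITION & SPEC =====
def Spec_reverse_pioneer_command_byte_py (command : Int) (out : Int) : Prop := out = reverse_pioneer_command_byte_py_alt command
instance (command : Int) (out : Int) : Decidable (Spec_reverse_pioneer_command_byte_py command out) := by unfold Spec_reverse_pioneer_command_byte_py; infer_instance

-- ===== CLAIM (what is proved, stated in full; the proofs are below) =====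
def Claim_equal_reverse_pioneer_command_byte_py : Prop := ∀ (command : Int), Dom_reverse_pioneer_command_byte_py command → Spec_reverse_pioneer_command_byte_py command (reverse_pioneer_command_byte_py command)

-- ===== LEMMAS AND PROOFS =====

-- command & 255 is command mod 256 (Python two's-complement &, also for negative command)
theorem pv_band255 (c : Int) : PySem.Int.band c 255 = c % 256 := by
  have hand : ∀ m : Nat, m &&& 255 = m % 256 := by
    intro m
    have := Nat.and_two_pow_sub_one_eq_mod m 8
    norm_num at this
    exact this
  unfold PySem.Int.band
  split_ifs with h1 h2 h2
  · rw [show ((255 : Int).toNat) = 255 from rfl, hand]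
    omega
  · norm_num at h2
  · rw [show ((255 : Int).toNat) = 255 from rfl, Nat.and_comm, hand]
    omega
  · norm_num at h2

-- bit i of c equals bit i of c mod 256, for i <= 7
theorem pv_bit_mod (c : Int) (i : Nat) (hi : i ≤ 7) :
    PySem.Int.band (c >>> i) 1 = PySem.Int.band ((c % 256) >>> i) 1 := by
  rw [PySem.Int.band_one, PySem.Int.band_one,
      Int.shiftRight_eq_div_pow, Int.shiftRight_eq_div_pow]
  simp only [PySem.Int.mod, Int.fmod_eq_emod]
  norm_num
  interval_cases i <;> push_cast <;> omega

-- A reads only the low byte of command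
theorem pv_A_mod (c : Int) :
    reverse_pioneer_command_byte_py c = reverse_pioneer_command_byte_py (c % 256) := by
  unfold reverse_pioneer_command_byte_py
  simp only [List.range_succ, List.range_zero, List.nil_append, List.cons_append,
    List.foldl_cons, List.foldl_nil]
  rw [pv_bit_mod c 0 (by omega), pv_bit_mod c 1 (by omega), pv_bit_mod c 2 (by omega),
      pv_bit_mod c 3 (by omega), pv_bit_mod c (0 + 4) (by omega), pv_bit_mod c (1 + 4) (by omega),
      pv_bit_mod c (2 + 4) (by omega), pv_bit_mod c (3 + 4) (by omega)]

-- B reads only the low byte of command (its first step is the mask)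
theorem pv_B_mod (c : Int) :
    reverse_pioneer_command_byte_py_alt c = reverse_pioneer_command_byte_py_alt (c % 256) := by
  simp only [reverse_pioneer_command_byte_py_alt, pv_band255, Int.emod_emod_of_dvd c
    (dvd_refl (256 : Int))]

-- the two ports agree on every residue 0..255
set_option maxRecDepth 100000 in
set_option maxHeartbeats 1000000 in
theorem pv_key : ∀ k : Fin 256,
    reverse_pioneer_command_byte_py (k.val : Int) = reverse_pioneer_command_byte_py_alt (k.val : Int) := by
  decide

-- ===== VERDICT (by name: the statement is the Claim_ definition above) =====
theorem reverse_pioneer_command_byte_py_spec : Claim_equal_reverse_pioneer_command_byte_py := by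
  intro command _
  unfold Spec_reverse_pioneer_command_byte_py
  rw [pv_A_mod, pv_B_mod]
  have h0 : 0 ≤ command % 256 := Int.emod_nonneg _ (by norm_num)
  have h1 : command % 256 < 256 := Int.emod_lt_of_pos _ (by norm_num)
  have hkey := pv_key ⟨(command % 256).toNat, by omega⟩
  simpa [Int.toNat_of_nonneg h0] using hkey
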